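-- pv_equiv track=rewrite | github.com/Cloudsflee/Auto_Test | src/tests/run_memory_compression_failure_scan.py | _pick_contract_probe_template
-- ===== SOURCE A (Python) =====
-- from typing import Any
--
-- def _pick_contract_probe_template(anchor: dict[str, Any], probe_index: int, variant_offset: int = 0) -> tuple[str, int]:
--     templates = anchor.get("probe_text_templates")
--     if not isinstance(templates, list):
--         return "", -1
--     cleaned = [str(item or "").strip() for item in templates if str(item or "").strip()]
--     if not cleaned:
--         return "", -1
--     idx = (max(0, probe_index - 1) + max(0, variant_offset)) % len(cleaned)
--     return cleaned[idx], idx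
-- ===== SOURCE B (Python) =====
-- def _pick_contract_probe_template(anchor, probe_index, variant_offset=0):
--     templates = anchor.get("probe_text_templates")
--     if not isinstance(templates, list):
--         return "", -1
--     # first pass: count surviving templates, never building the cleaned list
--     n = 0
--     for item in templates:
--         if str(item or "").strip():
--             n += 1
--     if n == 0:
--         return "", -1
--     idx = (max(0, probe_index - 1) + max(0, variant_offset)) % n
--     # second pass: walk to the idx-th surviving template
--     remaining = idx
--     for item in templates:
--         cleaned = str(item or "").strip()
--         if cleaned:
--             if remaining == 0:
--                 return cleaned, idx
--             remaining -= 1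
--     return "", -1  # unreachable: idx < n
-- ===== Notes on version B (the rewrite author's own statement) =====
-- stated objective: alternative
-- what changed: Replaces the materialized list comprehension plus direct indexing with a two-pass streaming scheme: a first pass only counts surviving templates, then idx is computed and a second pass walks to the idx-th surviving template without ever building the cleaned list (O(1) extra space).
import Mathlib
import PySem

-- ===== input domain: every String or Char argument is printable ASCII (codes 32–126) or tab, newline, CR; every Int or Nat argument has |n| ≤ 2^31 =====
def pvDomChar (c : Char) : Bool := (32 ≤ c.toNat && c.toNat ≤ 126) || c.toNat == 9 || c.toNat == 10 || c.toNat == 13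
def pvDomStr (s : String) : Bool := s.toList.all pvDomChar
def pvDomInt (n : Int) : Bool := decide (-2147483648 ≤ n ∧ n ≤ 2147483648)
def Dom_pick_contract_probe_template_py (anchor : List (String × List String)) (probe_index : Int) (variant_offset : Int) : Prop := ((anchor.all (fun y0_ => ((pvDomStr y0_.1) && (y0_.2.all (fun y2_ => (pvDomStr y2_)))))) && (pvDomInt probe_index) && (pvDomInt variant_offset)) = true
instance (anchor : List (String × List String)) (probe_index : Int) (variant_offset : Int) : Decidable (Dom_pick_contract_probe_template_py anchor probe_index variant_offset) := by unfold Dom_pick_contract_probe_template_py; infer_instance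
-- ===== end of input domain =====

-- B replaces the materialized cleaned-list comprehension by a two-pass stream: count survivors, then
-- walk to the idx-th survivor; same return value, O(1) extra space (alternative decomposition, not faster).

-- ===== PORT A =====
-- str(item or "").strip() on a string item equals item.strip(): 'item or ""' is item unless item == "",
-- and then .strip() of "" is "" as well; ported exactly as PySem.Str.strip item.
def pvClean (item : String) : Option String :=
  let c := PySem.Str.strip item
  if c ≠ "" then some c else none

def pick_contract_probe_template_py (anchor : List (String × List String)) (probe_index : Int) (variant_offset : Int) : String × Int :=
  match (PySem.Dict.ofList anchor).get? "probe_text_templates" with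
  | none => ("", -1)   -- templates is None, not a list
  | some templates =>
    let cleaned := templates.filterMap pvClean
    if cleaned = [] then ("", -1)
    else
      let idx := PySem.Int.mod (max 0 (probe_index - 1) + max 0 variant_offset) (cleaned.length : Int)
      ((PySem.List.pyGet? cleaned idx).getD "", idx)   -- 0 ≤ idx < len(cleaned): always in range

-- ===== PORT B =====
def pvCountClean : List String → Nat
  | [] => 0
  | item :: rest => (if PySem.Str.strip item ≠ "" then 1 else 0) + pvCountClean rest

def pvScanClean : List String → Nat → Int → String × Int
  | [], _, _ => ("", -1)   -- unreachable in context: idx < number of survivors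
  | item :: rest, remaining, idx =>
    let cleaned := PySem.Str.strip item
    if cleaned ≠ "" then
      if remaining = 0 then (cleaned, idx) else pvScanClean rest (remaining - 1) idx
    else pvScanClean rest remaining idx

def pick_contract_probe_template_py_alt (anchor : List (String × List String)) (probe_index : Int) (variant_offset : Int) : String × Int :=
  match (PySem.Dict.ofList anchor).get? "probe_text_templates" with
  | none => ("", -1)
  | some templates =>
    let n := pvCountClean templates
    if n = 0 then ("", -1)
    else
      let idx := PySem.Int.mod (max 0 (probe_index - 1) + max 0 variant_offset) (n : Int)
      pvScanClean templates idx.toNat idx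

-- ===== PRECONDITION & SPEC =====
def Spec_pick_contract_probe_template_py (anchor : List (String × List String)) (probe_index : Int) (variant_offset : Int) (out : String × Int) : Prop := out = pick_contract_probe_template_py_alt anchor probe_index variant_offset
instance (anchor : List (String × List String)) (probe_index : Int) (variant_offset : Int) (out : String × Int) : Decidable (Spec_pick_contract_probe_template_py anchor probe_index variant_offset out) := by unfold Spec_pick_contract_probe_template_py; infer_instance

-- ===== CLAIM (what is proved, stated in full; the proofs are below) =====
def Claim_equal_pick_contract_probe_template_py : Prop := ∀ (anchor : List (String × List String)) (probe_index : Int) (variant_offset : Int), Dom_pick_contract_probe_template_py anchor probe_index variant_offset → Spec_pick_contract_probe_template_py anchor probe_index variant_offset (pick_contract_probe_template_py anchor probe_index variant_offset)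

-- ===== LEMMAS AND PROOFS =====
theorem pvCountClean_eq (l : List String) : pvCountClean l = (l.filterMap pvClean).length := by
  induction l with
  | nil => rfl
  | cons x rest ih =>
    by_cases h : PySem.Str.strip x = ""
    · have hx : pvClean x = none := by simp [pvClean, h]
      simp [pvCountClean, hx, h, ih]
    · have hx : pvClean x = some (PySem.Str.strip x) := by simp [pvClean, h]
      simp [pvCountClean, hx, h, ih]
      omega

theorem pvScanClean_eq (l : List String) (k : Nat) (idx : Int)
    (hk : k < (l.filterMap pvClean).length) :
    pvScanClean l k idx = (((l.filterMap pvClean)[k]?).getD "", idx) := by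
  induction l generalizing k with
  | nil => simp at hk
  | cons x rest ih =>
    by_cases h : PySem.Str.strip x = ""
    · have hx : pvClean x = none := by simp [pvClean, h]
      simp only [List.filterMap_cons, hx] at hk ⊢
      rw [pvScanClean, if_neg (by simp [h])]
      exact ih k hk
    · have hx : pvClean x = some (PySem.Str.strip x) := by simp [pvClean, h]
      simp only [List.filterMap_cons, hx] at hk ⊢
      rcases k with _ | k
      · rw [pvScanClean, if_pos h, if_pos rfl]
        simp
      · rw [pvScanClean, if_pos h, if_neg (Nat.succ_ne_zero k)]
        have hk' : k < (rest.filterMap pvClean).length := by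
          simpa using Nat.lt_of_succ_lt_succ hk
        simpa using ih k hk'

-- ===== VERDICT (by name: the statement is the Claim_ definition above) =====
theorem pick_contract_probe_template_py_spec : Claim_equal_pick_contract_probe_template_py := by
  intro anchor probe_index variant_offset _
  unfold Spec_pick_contract_probe_template_py
  unfold pick_contract_probe_template_py pick_contract_probe_template_py_alt
  cases h : (PySem.Dict.ofList anchor).get? "probe_text_templates" with
  | none => rfl
  | some templates =>
    simp only [pvCountClean_eq]
    by_cases hnil : templates.filterMap pvClean = []
    · simp [hnil]
    · have hlen : 0 < (templates.filterMap pvClean).length := List.length_pos_iff.mpr hnil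
      simp only [if_neg hnil, if_neg (Nat.pos_iff_ne_zero.mp hlen)]
      set a := max 0 (probe_index - 1) + max 0 variant_offset with ha
      have hposI : (0 : Int) < ((templates.filterMap pvClean).length : Int) := by
        exact_mod_cast hlen
      have h0 : 0 ≤ PySem.Int.mod a ((templates.filterMap pvClean).length : Int) :=
        PySem.Int.mod_nonneg a hposI
      have h1 := PySem.Int.mod_lt a hposI
      have hk : (PySem.Int.mod a ((templates.filterMap pvClean).length : Int)).toNat
          < (templates.filterMap pvClean).length := by omega
      rw [pvScanClean_eq _ _ _ hk, PySem.List.pyGet?_of_nonneg _ h0]
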